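-- pv_equiv track=rewrite | github.com/sneha-royal/Mapup_Assesment | submissions/python_section_1.py | rotate_and_multiply_matrix
-- ===== SOURCE A (Python) =====
-- def rotate_and_multiply_matrix(matrix):
--     n = len(matrix)  # Size of the n x n matrix
--
--     # Step 1: Rotate the matrix by 90 degrees clockwise
--     rotated_matrix = [[0] * n for _ in range(n)]  # Create an empty n x n matrix
--     for i in range(n):
--         for j in range(n):
--             rotated_matrix[j][n - 1 - i] = matrix[i][j]
--
--     # Step 2: Calculate row and column sums
--     row_sums = [sum(row) for row in rotated_matrix]
--     col_sums = [sum(rotated_matrix[i][j] for i in range(n)) for j in range(n)]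
--
--     # Step 3: Create the final transformed matrix
--     final_matrix = [[0] * n for _ in range(n)]
--     for i in range(n):
--         for j in range(n):
--             # Replace each element with the sum of its row and column, excluding itself
--             final_matrix[i][j] = row_sums[i] + col_sums[j] - rotated_matrix[i][j]
--
--     return final_matrix
-- ===== SOURCE B (Python) =====
-- def rotate_and_multiply_matrix(matrix):
--     # Scatter algorithm: no rotated buffer and no sum vectors.  Each original
--     # element matrix[r][c] lands at rotated position (c, n-1-r); it broadcasts
--     # its value to every cell of that row and that column of the output, and
--     # subtracts itself once, so out[i][j] accumulates exactly
--     # rowsum_rot[i] + colsum_rot[j] - rotated[i][j].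
--     n = len(matrix)
--     out = [[0] * n for _ in range(n)]
--     for r in range(n):
--         for c in range(n):
--             v = matrix[r][c]
--             i = c
--             j = n - 1 - r
--             for k in range(n):
--                 out[i][k] += v
--                 out[k][j] += v
--             out[i][j] -= v
--     return out
-- ===== Notes on version B (the rewrite author's own statement) =====
-- stated objective: alternative
-- what changed: B replaces A's gather (build the rotated matrix, precompute its row/column sum vectors, then fill each cell with rowsum+colsum-self) by a scatter: it keeps no rotated buffer and no sum vectors at all, and instead each original element broadcasts its value to the whole output row and column of its rotated position and subtracts itself once; the superposition of these per-element updates yields the same result.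
import Mathlib
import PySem

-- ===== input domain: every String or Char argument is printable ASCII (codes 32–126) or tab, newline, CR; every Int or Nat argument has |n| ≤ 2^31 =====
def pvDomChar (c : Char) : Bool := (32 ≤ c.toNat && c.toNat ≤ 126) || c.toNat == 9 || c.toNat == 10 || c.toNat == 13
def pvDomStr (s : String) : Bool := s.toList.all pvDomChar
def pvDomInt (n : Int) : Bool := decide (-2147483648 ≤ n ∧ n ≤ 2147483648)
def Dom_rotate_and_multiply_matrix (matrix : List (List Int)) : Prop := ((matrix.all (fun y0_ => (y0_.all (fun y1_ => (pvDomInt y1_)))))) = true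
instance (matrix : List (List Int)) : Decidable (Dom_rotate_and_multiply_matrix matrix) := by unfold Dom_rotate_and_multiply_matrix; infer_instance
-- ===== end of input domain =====

-- B is a scatter algorithm: no rotated buffer and no sum vectors; every element broadcasts
-- its value to the output row and column of its rotated position and subtracts itself once
-- (objective: alternative algorithm, same result by superposition).

-- ===== PORT A =====
-- 'rotated_matrix[r][c] = v' (list-of-lists cell assignment) ported by hand with List.set:
def pvUpd (acc : List (List Int)) (r c : Nat) (v : Int) : List (List Int) :=
  acc.set r ((acc.getD r []).set c v)

-- matrix[i][j] is ported with getD 0; exact under Pre_ (every row has length ≥ n), which is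
-- exactly the set of inputs where the Python returns (a shorter row raises IndexError).
def rotate_and_multiply_matrix (matrix : List (List Int)) : List (List Int) :=
  let n := matrix.length
  let rotated := (List.range n).foldl (fun acc i =>
      (List.range n).foldl (fun acc j =>
        pvUpd acc j (n - 1 - i) ((matrix.getD i []).getD j 0)) acc)
    (List.replicate n (List.replicate n 0))
  let row_sums := rotated.map (fun row => row.sum)
  let col_sums := (List.range n).map (fun j =>
      ((List.range n).map (fun i => (rotated.getD i []).getD j 0)).sum)
  (List.range n).foldl (fun acc i =>
    (List.range n).foldl (fun acc j =>
      pvUpd acc i j (row_sums.getD i 0 + col_sums.getD j 0 - (rotated.getD i []).getD j 0)) acc)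
    (List.replicate n (List.replicate n 0))

-- ===== PORT B =====
-- 'out[r][c] += v' (in-place increment of a cell) ported by hand with List.set:
def pvAddAt (a : List (List Int)) (r c : Nat) (v : Int) : List (List Int) :=
  a.set r ((a.getD r []).set c ((a.getD r []).getD c 0 + v))

-- 'out[i][j] -= v' is ported as pvAddAt … (-v)
def rotate_and_multiply_matrix_alt (matrix : List (List Int)) : List (List Int) :=
  let n := matrix.length
  (List.range n).foldl (fun acc r =>
    (List.range n).foldl (fun acc c =>
      let v := (matrix.getD r []).getD c 0
      let i := c
      let j := n - 1 - r
      pvAddAt ((List.range n).foldl (fun acc k =>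
        pvAddAt (pvAddAt acc i k v) k j v) acc) i j (-v)) acc)
    (List.replicate n (List.replicate n 0))

-- ===== PRECONDITION & SPEC =====
-- Exactly the inputs on which the Python A returns: every row needs at least n = len(matrix)
-- entries, otherwise matrix[i][j] raises IndexError for some j < n.
def Pre_rotate_and_multiply_matrix (matrix : List (List Int)) : Prop :=
  ∀ row ∈ matrix, matrix.length ≤ row.length
instance (matrix : List (List Int)) : Decidable (Pre_rotate_and_multiply_matrix matrix) := by
  unfold Pre_rotate_and_multiply_matrix; infer_instance

def pvWitness_rotate_and_multiply_matrix : List (List Int) := [[1, 2], [3, 4]]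

def Spec_rotate_and_multiply_matrix (matrix : List (List Int)) (out : List (List Int)) : Prop := out = rotate_and_multiply_matrix_alt matrix
instance (matrix : List (List Int)) (out : List (List Int)) : Decidable (Spec_rotate_and_multiply_matrix matrix out) := by unfold Spec_rotate_and_multiply_matrix; infer_instance

-- ===== CLAIM (what is proved, stated in full; the proofs are below) =====
def Claim_equal_rotate_and_multiply_matrix : Prop := ∀ (matrix : List (List Int)), Dom_rotate_and_multiply_matrix matrix → Pre_rotate_and_multiply_matrix matrix → Spec_rotate_and_multiply_matrix matrix (rotate_and_multiply_matrix matrix)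

-- ===== LEMMAS AND PROOFS =====

-- the entry of a list-of-lists, and the n×n shape invariant
def pvE (a : List (List Int)) (p q : Nat) : Int := (a.getD p []).getD q 0
def pvShape (n : Nat) (a : List (List Int)) : Prop :=
  a.length = n ∧ ∀ row ∈ a, row.length = n

theorem getD_set {α : Type} (a : List α) (k : Nat) (x : α) (r : Nat) (d : α) :
    (a.set k x).getD r d = if r = k ∧ k < a.length then x else a.getD r d := by
  simp [List.getD, List.getElem?_set]
  split_ifs with h1 h2 h3 h4 <;> simp_all

theorem getD_pvUpd (a : List (List Int)) (k c : Nat) (v : Int) (r : Nat) :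
    (pvUpd a k c v).getD r [] = if r = k then (a.getD k []).set c v else a.getD r [] := by
  rw [pvUpd, getD_set]
  split_ifs with h1 h2 <;> simp_all

theorem foldl_len {α : Type} (F : List α → Nat → List α)
    (hF : ∀ x j, (F x j).length = x.length) :
    ∀ (l : List Nat) (a : List α), (l.foldl F a).length = a.length := by
  intro l
  induction l with
  | nil => simp
  | cons x xs ih => intro a; simp [List.foldl_cons, ih, hF]

theorem getD_map_range {α : Type} [Inhabited α] (n r : Nat) (g : Nat → α) (d : α) (h : r < n) :
    (((List.range n).map g).getD r d) = g r := by
  simp [List.getD, h]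

-- rotated fill, inner loop: row j gets column c := n-1-i written; each j touches a distinct row
theorem innerA (c : Nat) (f : Nat → Int) :
    ∀ (k : Nat) (a : List (List Int)) (r : Nat),
    ((List.range k).foldl (fun acc j => pvUpd acc j c (f j)) a).getD r [] =
      if r < k then (a.getD r []).set c (f r) else a.getD r [] := by
  intro k
  induction k with
  | zero => simp
  | succ k ih =>
    intro a r
    rw [List.range_succ, List.foldl_append, List.foldl_cons, List.foldl_nil, getD_pvUpd, ih, ih]
    by_cases hrk : r = k
    · subst hrk; simp
    · simp [hrk]
      split_ifs with h1 h2 h3 <;> try rfl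
      · omega
      · omega

-- final fill, inner loop: row i rewritten at successive columns
theorem innerB (i : Nat) (g : Nat → Int) :
    ∀ (k : Nat) (a : List (List Int)) (r : Nat),
    ((List.range k).foldl (fun acc j => pvUpd acc i j (g j)) a).getD r [] =
      if r = i then (List.range k).foldl (fun row j => row.set j (g j)) (a.getD i []) else a.getD r [] := by
  intro k
  induction k with
  | zero => simp
  | succ k ih =>
    intro a r
    rw [List.range_succ, List.foldl_append, List.foldl_cons, List.foldl_nil, getD_pvUpd, ih, ih]
    by_cases hri : r = i <;> simp [hri]

theorem rowfill_len (g : Nat → Int) (k : Nat) (row : List Int) :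
    ((List.range k).foldl (fun row j => row.set j (g j)) row).length = row.length := by
  induction k generalizing row with
  | zero => simp
  | succ k ih => rw [List.range_succ, List.foldl_append, List.foldl_cons, List.foldl_nil]; simp [ih]

theorem rowfill_getD (g : Nat → Int) :
    ∀ (k : Nat) (row : List Int) (c : Nat), c < row.length →
    ((List.range k).foldl (fun row j => row.set j (g j)) row).getD c 0 =
      if c < k then g c else row.getD c 0 := by
  intro k
  induction k with
  | zero => simp
  | succ k ih =>
    intro row c hc
    rw [List.range_succ, List.foldl_append, List.foldl_cons, List.foldl_nil, getD_set, ih _ _ hc]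
    rw [rowfill_len]
    by_cases hck : c = k
    · subst hck; simp [hc]
    · simp only [hck, false_and, if_false]
      split_ifs with h1 h2 h3 <;> first | rfl | omega

theorem listsum_bridge (n : Nat) (f : Nat → Int) :
    ((List.range n).map f).sum = ∑ i ∈ Finset.range n, f i := by
  induction n with
  | zero => simp
  | succ n ih => rw [List.range_succ, Finset.sum_range_succ]; simp [ih]

theorem listsum_reflect (n : Nat) (f : Nat → Int) :
    ((List.range n).map (fun c => f (n - 1 - c))).sum = ((List.range n).map f).sum := by
  rw [listsum_bridge, listsum_bridge, Finset.sum_range_reflect]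

theorem eq_map_range {α : Type} (d : α) (l : List α) (n : Nat) (g : Nat → α)
    (hl : l.length = n) (h : ∀ r, r < n → l.getD r d = g r) : l = (List.range n).map g := by
  apply List.ext_getElem (by simpa)
  intro i h1 h2
  have h3 := h i (by omega)
  rw [List.getD_eq_getElem l d h1] at h3
  simpa using h3

-- entrywise characterisation of A's rotated-matrix fill (with the row-length invariant)
theorem outRot (n : Nat) (m : Nat → Nat → Int) :
    ∀ (k : Nat), k ≤ n → ∀ r, r < n →
    (((List.range k).foldl (fun acc i =>
        (List.range n).foldl (fun acc j => pvUpd acc j (n - 1 - i) (m i j)) acc)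
        (List.replicate n (List.replicate n 0))).getD r []).length = n ∧
    ∀ c, c < n →
    (((List.range k).foldl (fun acc i =>
        (List.range n).foldl (fun acc j => pvUpd acc j (n - 1 - i) (m i j)) acc)
        (List.replicate n (List.replicate n 0))).getD r []).getD c 0 =
      if n - k ≤ c then m (n - 1 - c) r else 0 := by
  intro k
  induction k with
  | zero =>
    intro _ r hr
    constructor
    · simp [List.getD_replicate, hr]
    · intro c hc
      rw [if_neg (by omega)]
      simp [List.getD_replicate, hr, hc]
  | succ k ih =>
    intro hk r hr
    obtain ⟨ihlen, ihent⟩ := ih (by omega) r hr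
    rw [List.range_succ, List.foldl_append, List.foldl_cons, List.foldl_nil, innerA, if_pos hr]
    refine ⟨by rw [List.length_set]; exact ihlen, ?_⟩
    intro c hc
    rw [getD_set, ihlen]
    by_cases hck : c = n - 1 - k
    · have : n - 1 - c = k := by omega
      rw [if_pos ⟨hck, by omega⟩, if_pos (by omega), this]
    · rw [if_neg (by simp [hck]), ihent c hc]
      by_cases h1 : n - k ≤ c
      · rw [if_pos h1, if_pos (by omega)]
      · rw [if_neg h1, if_neg (by omega)]

-- row-level characterisation of A's final fill
theorem outFin (n : Nat) (G : Nat → Nat → Int) :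
    ∀ (k : Nat) (a : List (List Int)) (r : Nat),
    ((List.range k).foldl (fun acc i =>
        (List.range n).foldl (fun acc j => pvUpd acc i j (G i j)) acc) a).getD r [] =
      if r < k then (List.range n).foldl (fun row j => row.set j (G r j)) (a.getD r []) else a.getD r [] := by
  intro k
  induction k with
  | zero => simp
  | succ k ih =>
    intro a r
    rw [List.range_succ, List.foldl_append, List.foldl_cons, List.foldl_nil, innerB, ih, ih]
    by_cases hrk : r = k
    · subst hrk; simp
    · simp only [hrk, if_false]
      split_ifs with h1 h2 h3 <;> first | rfl | omega

theorem rot_eq (n : Nat) (m : Nat → Nat → Int) :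
    (List.range n).foldl (fun acc i =>
      (List.range n).foldl (fun acc j => pvUpd acc j (n - 1 - i) (m i j)) acc)
      (List.replicate n (List.replicate n 0))
    = (List.range n).map (fun r => (List.range n).map (fun c => m (n - 1 - c) r)) := by
  apply eq_map_range ([] : List Int)
  · rw [foldl_len _ (fun a i => foldl_len _ (fun x j => by simp [pvUpd]) _ a)]
    simp
  · intro r hr
    obtain ⟨hlen, hent⟩ := outRot n m n le_rfl r hr
    apply eq_map_range (0 : Int) _ _ _ hlen
    intro c hc
    rw [hent c hc, if_pos (by omega)]

theorem fin_eq (n : Nat) (G : Nat → Nat → Int) :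
    (List.range n).foldl (fun acc i =>
      (List.range n).foldl (fun acc j => pvUpd acc i j (G i j)) acc)
      (List.replicate n (List.replicate n 0))
    = (List.range n).map (fun i => (List.range n).map (fun j => G i j)) := by
  apply eq_map_range ([] : List Int)
  · rw [foldl_len _ (fun a i => foldl_len _ (fun x j => by simp [pvUpd]) _ a)]
    simp
  · intro r hr
    rw [outFin, if_pos hr]
    have hrow : (List.replicate n (List.replicate (n:Nat) (0:Int))).getD r [] = List.replicate n 0 := by
      simp [List.getD_replicate, hr]
    rw [hrow]
    apply eq_map_range (0 : Int)
    · rw [rowfill_len]; simp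
    · intro c hc
      rw [rowfill_getD _ _ _ _ (by simpa using hc), if_pos hc]

-- A's result, entrywise: gather form (sums of the rotated matrix minus the rotated entry)
theorem A_eq (matrix : List (List Int)) :
    rotate_and_multiply_matrix matrix =
      (List.range matrix.length).map (fun p => (List.range matrix.length).map (fun q =>
        ((List.range matrix.length).map (fun r => (matrix.getD r []).getD p 0)).sum
        + ((List.range matrix.length).map (fun c =>
            (matrix.getD (matrix.length - 1 - q) []).getD c 0)).sum
        - (matrix.getD (matrix.length - 1 - q) []).getD p 0)) := by
  simp only [rotate_and_multiply_matrix]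
  rw [rot_eq matrix.length (fun i j => (matrix.getD i []).getD j 0), fin_eq]
  apply List.map_congr_left
  intro p hp
  have hpn : p < matrix.length := List.mem_range.1 hp
  apply List.map_congr_left
  intro q hq
  have hqn : q < matrix.length := List.mem_range.1 hq
  have hrev : matrix.length - 1 - q < matrix.length := by omega
  rw [List.map_map]
  rw [getD_map_range _ _ _ _ hpn, getD_map_range _ _ _ _ hpn, getD_map_range _ _ _ _ hqn]
  simp only [Function.comp]
  congr 1
  · congr 1
    · exact listsum_reflect matrix.length (fun k => (matrix.getD k []).getD p 0)
    · apply congrArg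
      apply List.map_congr_left
      intro i hi
      rw [getD_map_range _ _ _ _ (List.mem_range.1 hi), getD_map_range _ _ _ _ hqn]
  · exact getD_map_range _ _ _ _ hqn

-- ===== B-side lemmas: pointwise additivity of the scatter =====

theorem shape_pvAddAt (n : Nat) (a : List (List Int)) (r c : Nat) (v : Int)
    (h : pvShape n a) : pvShape n (pvAddAt a r c v) := by
  obtain ⟨hlen, hrow⟩ := h
  by_cases hr : r < a.length
  · refine ⟨by simp [pvAddAt, hlen], ?_⟩
    intro row hmem
    rcases List.mem_or_eq_of_mem_set hmem with h1 | h1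
    · exact hrow _ h1
    · subst h1
      rw [List.length_set, List.getD_eq_getElem a [] hr]
      exact hrow _ (List.getElem_mem hr)
  · have hid : pvAddAt a r c v = a := by
      unfold pvAddAt; exact List.set_eq_of_length_le (by omega)
    rw [hid]; exact ⟨hlen, hrow⟩

theorem E_pvAddAt (n : Nat) (a : List (List Int)) (r c p q : Nat) (v : Int)
    (hs : pvShape n a) (hr : r < n) (hc : c < n) :
    pvE (pvAddAt a r c v) p q = pvE a p q + (if p = r ∧ q = c then v else 0) := by
  obtain ⟨hlen, hrow⟩ := hs
  have hrowlen : (a.getD r []).length = n := by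
    have hr' : r < a.length := by omega
    rw [List.getD_eq_getElem a [] hr']
    exact hrow _ (List.getElem_mem hr')
  unfold pvE pvAddAt
  rw [getD_set]
  by_cases hpr : p = r
  · subst hpr
    rw [if_pos ⟨rfl, by omega⟩, getD_set, hrowlen]
    by_cases hqc : q = c
    · subst hqc; rw [if_pos ⟨rfl, hc⟩, if_pos ⟨rfl, rfl⟩]
    · rw [if_neg (by simp [hqc]), if_neg (by simp [hqc])]; ring
  · rw [if_neg (by simp [hpr]), if_neg (by simp [hpr])]; ring

-- generic lemma: a fold of pointwise-additive, shape-preserving steps adds the sum of deltas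
theorem foldl_E_add {β : Type} (n p q : Nat) (g : β → Int)
    (f : List (List Int) → β → List (List Int)) :
    ∀ (l : List β),
    (∀ a x, x ∈ l → pvShape n a → pvShape n (f a x) ∧ pvE (f a x) p q = pvE a p q + g x) →
    ∀ a, pvShape n a →
    pvShape n (l.foldl f a) ∧ pvE (l.foldl f a) p q = pvE a p q + (l.map g).sum := by
  intro l
  induction l with
  | nil => intro _ a ha; simpa using ha
  | cons x xs ih =>
    intro h a ha
    obtain ⟨hs, he⟩ := h a x (List.mem_cons_self) ha
    obtain ⟨hs', he'⟩ := ih (fun a y hy hsh => h a y (List.mem_cons_of_mem _ hy) hsh) (f a x) hs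
    refine ⟨hs', ?_⟩
    rw [List.foldl_cons] at *
    rw [he', he, List.map_cons, List.sum_cons]
    ring

-- sum of a point mass over range n
theorem sum_delta (n q : Nat) (v : Int) (hq : q < n) :
    ((List.range n).map (fun k => if q = k then v else 0)).sum = v := by
  rw [listsum_bridge]
  rw [Finset.sum_ite_eq (Finset.range n) q (fun _ => v)]
  simp [hq]

-- effect of one element's broadcast (the inner k-loop plus the final subtraction) on entry (p,q)
theorem cell_effect (n : Nat) (m : Nat → Nat → Int) (r c p q : Nat)
    (hr : r < n) (hc : c < n) (hp : p < n) (hq : q < n) :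
    ∀ a, pvShape n a →
    pvShape n (pvAddAt ((List.range n).foldl (fun acc k =>
        pvAddAt (pvAddAt acc c k (m r c)) k (n - 1 - r) (m r c)) a) c (n - 1 - r) (-(m r c))) ∧
    pvE (pvAddAt ((List.range n).foldl (fun acc k =>
        pvAddAt (pvAddAt acc c k (m r c)) k (n - 1 - r) (m r c)) a) c (n - 1 - r) (-(m r c))) p q
      = pvE a p q
        + ((if p = c then m r c else 0) + (if q = n - 1 - r then m r c else 0)
           + (if p = c ∧ q = n - 1 - r then -(m r c) else 0)) := by
  intro a ha
  have hj : n - 1 - r < n := by omega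
  have hinner := foldl_E_add n p q
      (fun k => (if p = c ∧ q = k then m r c else 0) + (if p = k ∧ q = n - 1 - r then m r c else 0))
      (fun acc k => pvAddAt (pvAddAt acc c k (m r c)) k (n - 1 - r) (m r c))
      (List.range n)
      (by
        intro b k hk hb
        have hkn : k < n := List.mem_range.1 hk
        have h1 := shape_pvAddAt n b c k (m r c) hb
        refine ⟨shape_pvAddAt n _ k (n - 1 - r) (m r c) h1, ?_⟩
        rw [E_pvAddAt n _ k (n - 1 - r) p q _ h1 hkn hj,
            E_pvAddAt n b c k p q _ hb hc hkn]
        ring)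
      a ha
  obtain ⟨hs, he⟩ := hinner
  refine ⟨shape_pvAddAt n _ c (n - 1 - r) _ hs, ?_⟩
  rw [E_pvAddAt n _ c (n - 1 - r) p q _ hs hc hj, he]
  have hsum : ((List.range n).map (fun k =>
      (if p = c ∧ q = k then m r c else 0) + (if p = k ∧ q = n - 1 - r then m r c else 0))).sum
      = (if p = c then m r c else 0) + (if q = n - 1 - r then m r c else 0) := by
    rw [show (fun k => (if p = c ∧ q = k then m r c else 0) + (if p = k ∧ q = n - 1 - r then m r c else 0))
        = fun k => ((if p = c ∧ q = k then m r c else 0) + (if p = k ∧ q = n - 1 - r then m r c else 0)) from rfl]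
    have : ∀ L : List Nat, (L.map (fun k =>
        (if p = c ∧ q = k then m r c else 0) + (if p = k ∧ q = n - 1 - r then m r c else 0))).sum
        = (L.map (fun k => if p = c ∧ q = k then m r c else 0)).sum
          + (L.map (fun k => if p = k ∧ q = n - 1 - r then m r c else 0)).sum := by
      intro L; induction L with
      | nil => simp
      | cons y ys ih => simp [ih]; ring
    rw [this]
    congr 1
    · by_cases hpc : p = c
      · simp only [hpc, true_and]
        rw [sum_delta n q (m r c) hq]
        simp [hpc]
      · simp [hpc]
    · by_cases hqj : q = n - 1 - r
      · simp only [hqj, and_true]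
        rw [sum_delta n p (m r c) hp]
        simp [hqj]
      · simp [hqj]
  rw [hsum]
  ring

-- B's result, entrywise: the superposed deltas
theorem B_entry (n : Nat) (m : Nat → Nat → Int) (p q : Nat) (hp : p < n) (hq : q < n) :
    pvShape n ((List.range n).foldl (fun acc r =>
      (List.range n).foldl (fun acc c =>
        pvAddAt ((List.range n).foldl (fun acc k =>
          pvAddAt (pvAddAt acc c k (m r c)) k (n - 1 - r) (m r c)) acc) c (n - 1 - r) (-(m r c))) acc)
      (List.replicate n (List.replicate n 0))) ∧
    pvE ((List.range n).foldl (fun acc r =>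
      (List.range n).foldl (fun acc c =>
        pvAddAt ((List.range n).foldl (fun acc k =>
          pvAddAt (pvAddAt acc c k (m r c)) k (n - 1 - r) (m r c)) acc) c (n - 1 - r) (-(m r c))) acc)
      (List.replicate n (List.replicate n 0))) p q
    = ((List.range n).map (fun r => ((List.range n).map (fun c =>
        (if p = c then m r c else 0) + (if q = n - 1 - r then m r c else 0)
        + (if p = c ∧ q = n - 1 - r then -(m r c) else 0))).sum)).sum := by
  have hshape0 : pvShape n (List.replicate n (List.replicate (n:Nat) (0:Int))) := by
    refine ⟨by simp, ?_⟩
    intro row h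
    rw [List.eq_of_mem_replicate h]; simp
  have hE0 : pvE (List.replicate n (List.replicate (n:Nat) (0:Int))) p q = 0 := by
    unfold pvE
    rw [List.getD_replicate _ hp, List.getD_replicate _ hq]
  have houter := foldl_E_add n p q
      (fun r => ((List.range n).map (fun c =>
        (if p = c then m r c else 0) + (if q = n - 1 - r then m r c else 0)
        + (if p = c ∧ q = n - 1 - r then -(m r c) else 0))).sum)
      (fun acc r => (List.range n).foldl (fun acc c =>
        pvAddAt ((List.range n).foldl (fun acc k =>
          pvAddAt (pvAddAt acc c k (m r c)) k (n - 1 - r) (m r c)) acc) c (n - 1 - r) (-(m r c))) acc)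
      (List.range n)
      (by
        intro a r hrmem ha
        have hrn : r < n := List.mem_range.1 hrmem
        exact foldl_E_add n p q
          (fun c => (if p = c then m r c else 0) + (if q = n - 1 - r then m r c else 0)
            + (if p = c ∧ q = n - 1 - r then -(m r c) else 0))
          _ (List.range n)
          (fun b c hcmem hb => cell_effect n m r c p q hrn (List.mem_range.1 hcmem) hp hq b hb)
          a ha)
      _ hshape0
  obtain ⟨hs, he⟩ := houter
  exact ⟨hs, by rw [he, hE0]; ring_nf⟩

-- the superposed deltas equal the gather form
theorem delta_sum_eq (n : Nat) (m : Nat → Nat → Int) (p q : Nat) (hp : p < n) (hq : q < n) :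
    ((List.range n).map (fun r => ((List.range n).map (fun c =>
        (if p = c then m r c else 0) + (if q = n - 1 - r then m r c else 0)
        + (if p = c ∧ q = n - 1 - r then -(m r c) else 0))).sum)).sum
    = ((List.range n).map (fun r => m r p)).sum
      + ((List.range n).map (fun c => m (n - 1 - q) c)).sum
      - m (n - 1 - q) p := by
  have hrev : n - 1 - q < n := by omega
  simp only [listsum_bridge]
  have hinner : ∀ r ∈ Finset.range n,
      (∑ c ∈ Finset.range n, ((if p = c then m r c else 0) + (if q = n - 1 - r then m r c else 0)
          + (if p = c ∧ q = n - 1 - r then -(m r c) else 0)))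
      = m r p + (if r = n - 1 - q then (∑ c ∈ Finset.range n, m r c) - m r p else 0) := by
    intro r hr
    have hrn := Finset.mem_range.1 hr
    rw [Finset.sum_add_distrib, Finset.sum_add_distrib]
    have e1 : (∑ c ∈ Finset.range n, if p = c then m r c else 0) = m r p := by
      rw [Finset.sum_ite_eq (Finset.range n) p (m r)]
      simp [hp]
    by_cases hcond : q = n - 1 - r
    · have hr' : r = n - 1 - q := by omega
      have e2 : (∑ c ∈ Finset.range n, if q = n - 1 - r then m r c else 0)
          = ∑ c ∈ Finset.range n, m r c := by simp [hcond]
      have e3 : (∑ c ∈ Finset.range n, if p = c ∧ q = n - 1 - r then -(m r c) else 0)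
          = -(m r p) := by
        have : ∀ c, (if p = c ∧ q = n - 1 - r then -(m r c) else 0)
            = (if p = c then -(m r c) else 0) := by
          intro c; simp [hcond]
        simp only [this]
        rw [Finset.sum_ite_eq (Finset.range n) p (fun c => -(m r c))]
        simp [hp]
      rw [e1, e2, e3, if_pos hr']
      ring
    · have hr' : ¬ (r = n - 1 - q) := by omega
      have e2 : (∑ c ∈ Finset.range n, if q = n - 1 - r then m r c else 0) = 0 := by
        simp [hcond]
      have e3 : (∑ c ∈ Finset.range n, if p = c ∧ q = n - 1 - r then -(m r c) else 0) = 0 := by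
        simp [hcond]
      rw [e1, e2, e3, if_neg hr']
      ring
  rw [Finset.sum_congr rfl hinner, Finset.sum_add_distrib]
  have e4 : (∑ r ∈ Finset.range n, if r = n - 1 - q then (∑ c ∈ Finset.range n, m r c) - m r p else 0)
      = (∑ c ∈ Finset.range n, m (n - 1 - q) c) - m (n - 1 - q) p := by
    rw [Finset.sum_ite_eq' (Finset.range n) (n - 1 - q)
        (fun r => (∑ c ∈ Finset.range n, m r c) - m r p)]
    simp [hrev]
  rw [e4]
  ring

-- shape plumbing for B's fold
theorem shape_row (n : Nat) (a : List (List Int)) (r : Nat)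
    (h : pvShape n a) (hr : r < n) : (a.getD r []).length = n := by
  obtain ⟨hlen, hrow⟩ := h
  have hr' : r < a.length := by omega
  rw [List.getD_eq_getElem a [] hr']
  exact hrow _ (List.getElem_mem hr')

theorem foldl_shape {β : Type} (n : Nat) (f : List (List Int) → β → List (List Int)) :
    ∀ (l : List β), (∀ a x, x ∈ l → pvShape n a → pvShape n (f a x)) →
    ∀ a, pvShape n a → pvShape n (l.foldl f a) := by
  intro l
  induction l with
  | nil => intro _ a ha; simpa using ha
  | cons x xs ih =>
    intro h a ha
    exact ih (fun a y hy => h a y (List.mem_cons_of_mem _ hy)) _ (h a x List.mem_cons_self ha)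

theorem shape_zero (n : Nat) : pvShape n (List.replicate n (List.replicate (n : Nat) (0 : Int))) := by
  refine ⟨by simp, ?_⟩
  intro row h
  rw [List.eq_of_mem_replicate h]; simp

theorem B_shape (n : Nat) (m : Nat → Nat → Int) :
    pvShape n ((List.range n).foldl (fun acc r =>
      (List.range n).foldl (fun acc c =>
        pvAddAt ((List.range n).foldl (fun acc k =>
          pvAddAt (pvAddAt acc c k (m r c)) k (n - 1 - r) (m r c)) acc) c (n - 1 - r) (-(m r c))) acc)
      (List.replicate n (List.replicate n 0))) := by
  apply foldl_shape n _ (List.range n) ?_ _ (shape_zero n)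
  intro a r _ ha
  apply foldl_shape n _ (List.range n) ?_ a ha
  intro b c _ hb
  exact shape_pvAddAt n _ c (n - 1 - r) _
    (foldl_shape n _ (List.range n)
      (fun d k _ hd => shape_pvAddAt n _ k (n - 1 - r) _ (shape_pvAddAt n _ c k _ hd)) b hb)

-- B's result as the same gather form (entrywise via B_entry + delta_sum_eq)
theorem B_eq (n : Nat) (m : Nat → Nat → Int) :
    ((List.range n).foldl (fun acc r =>
      (List.range n).foldl (fun acc c =>
        pvAddAt ((List.range n).foldl (fun acc k =>
          pvAddAt (pvAddAt acc c k (m r c)) k (n - 1 - r) (m r c)) acc) c (n - 1 - r) (-(m r c))) acc)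
      (List.replicate n (List.replicate n 0)))
    = (List.range n).map (fun p => (List.range n).map (fun q =>
        ((List.range n).map (fun r => m r p)).sum
        + ((List.range n).map (fun c => m (n - 1 - q) c)).sum
        - m (n - 1 - q) p)) := by
  apply eq_map_range ([] : List Int)
  · exact (B_shape n m).1
  · intro p hp
    apply eq_map_range (0 : Int)
    · exact shape_row n _ p (B_shape n m) hp
    · intro q hq
      have he := (B_entry n m p q hp hq).2
      unfold pvE at he
      rw [he]
      exact delta_sum_eq n m p q hp hq

-- final equivalence of the two ports
theorem ports_agree (matrix : List (List Int)) :
    rotate_and_multiply_matrix matrix = rotate_and_multiply_matrix_alt matrix := by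
  rw [A_eq]
  exact (B_eq matrix.length (fun r c => (matrix.getD r []).getD c 0)).symm

-- ===== VERDICT (by name: the statement is the Claim_ definition above) =====
theorem rotate_and_multiply_matrix_spec : Claim_equal_rotate_and_multiply_matrix := by
  intro matrix _ _
  unfold Spec_rotate_and_multiply_matrix
  exact ports_agree matrix
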